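-- pv_equiv track=rewrite | github.com/AkashKodihithlu/PlagiarismDetector | backend/dataset/dfs_py_12.py | solve
-- ===== SOURCE A (Python) =====
-- def solve(adj, start):
--     visited = set()
--     def dfs(v):
--         if v not in visited:
--             visited.add(v)
--             for neighbor in adj.get(v, []):
--
--                 dfs(neighbor)
--     dfs(start)
--     return visited
-- ===== SOURCE B (Python) =====
-- def solve(adj, start):
--     visited = set()
--     stack = [start]
--     while stack:
--         v = stack.pop()
--         if v not in visited:
--             visited.add(v)
--             stack.extend(reversed(adj.get(v, [])))
--     return visited
-- ===== Notes on version B (the rewrite author's own statement) =====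
-- stated objective: alternative
-- what changed: Replaced the recursive closure-based DFS with an iterative DFS that keeps an explicit stack list, popping nodes and pushing their neighbors in reverse, so no recursion (and no RecursionError on deep graphs) is needed.
import Mathlib
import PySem

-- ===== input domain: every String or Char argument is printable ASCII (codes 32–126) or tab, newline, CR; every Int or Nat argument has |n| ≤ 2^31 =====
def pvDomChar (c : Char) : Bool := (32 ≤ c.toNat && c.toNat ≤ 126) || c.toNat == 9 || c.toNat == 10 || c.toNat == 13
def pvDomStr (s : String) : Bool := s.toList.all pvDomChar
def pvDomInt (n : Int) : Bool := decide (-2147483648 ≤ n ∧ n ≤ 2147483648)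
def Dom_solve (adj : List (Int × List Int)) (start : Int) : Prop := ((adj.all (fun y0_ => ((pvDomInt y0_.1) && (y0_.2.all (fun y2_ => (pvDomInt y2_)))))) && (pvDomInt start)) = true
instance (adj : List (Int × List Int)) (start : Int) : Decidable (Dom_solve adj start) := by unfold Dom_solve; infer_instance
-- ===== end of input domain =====

-- B replaces A's recursive DFS closure with an iterative explicit-stack DFS (neighbors pushed in
-- reverse), an alternative decomposition returning the same visited set.


-- ===== PORT A =====
-- adj.get(v, [])
def solveNbrs (adj : List (Int × List Int)) (v : Int) : List Int :=
  PySem.Dict.getD (PySem.Dict.mk adj) v []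

-- recursive dfs: 'if v not in visited: visited.add(v); for neighbor in adj.get(v, []): dfs(neighbor)'.
-- The Nat fuel is ONLY a totality guard: adj.length + 1 strictly exceeds the recursion depth
-- (each nested call adds a distinct key of adj to visited; proved in the lemmas below).
def solveDfs (adj : List (Int × List Int)) : Nat → PySem.Set Int → Int → PySem.Set Int
  | 0, visited, _ => visited
  | f + 1, visited, v =>
    if PySem.Set.contains visited v then visited
    else (solveNbrs adj v).foldl (solveDfs adj f) (PySem.Set.add visited v)

def solve (adj : List (Int × List Int)) (start : Int) : List Int :=
  solveDfs adj (adj.length + 1) PySem.Set.empty start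

-- ===== PORT B =====
-- number of keys of adj not yet visited: the termination measure of the while loop
def solveCnt (adj : List (Int × List Int)) (visited : PySem.Set Int) : Nat :=
  ((adj.map Prod.fst).filter (fun k => !(PySem.Set.contains visited k))).length

-- generic helper for the termination argument: a filter by a stronger predicate that some
-- element of the list fails strictly shrinks
theorem pvFilterLenLt {α : Type} (p q : α → Bool) (l : List α) (v : α)
    (himp : ∀ x, q x = true → p x = true) (hv : v ∈ l) (hpv : p v = true) (hqv : q v = false) :
    (l.filter q).length < (l.filter p).length := by
  induction l with
  | nil => cases hv
  | cons a l ih =>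
    rcases List.mem_cons.mp hv with rfl | hv'
    · simp only [List.filter_cons, hpv, hqv]
      have : (l.filter q).length ≤ (l.filter p).length := by
        simpa [List.countP_eq_length_filter] using
          List.countP_mono_left (l := l) (p := q) (q := p) (fun x _ => himp x)
      simp; omega
    · have h := ih hv'
      by_cases hq : q a = true
      · simp only [List.filter_cons, hq, himp a hq]; simpa using h
      · by_cases hp : p a = true
        · simp only [List.filter_cons, hp, if_pos]
          simp only [eq_false_of_ne_true hq, Bool.false_eq_true, if_false, List.length_cons]
          omega
        · simp only [List.filter_cons, eq_false_of_ne_true hq, eq_false_of_ne_true hp,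
            Bool.false_eq_true, if_false]
          exact h

-- loop step decreases the measure: either a new key gets visited, or the node has no neighbors
theorem solveDec (adj : List (Int × List Int)) (visited : PySem.Set Int) (v : Int)
    (h : PySem.Set.contains visited v = false) :
    solveCnt adj (PySem.Set.add visited v) < solveCnt adj visited ∨
      (solveCnt adj (PySem.Set.add visited v) = solveCnt adj visited ∧ solveNbrs adj v = []) := by
  have hadd : PySem.Set.add visited v = visited ++ [v] := by
    unfold PySem.Set.add; rw [if_neg (fun hc => Bool.false_ne_true (h ▸ hc))]
  by_cases hv : v ∈ adj.map Prod.fst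
  · left
    rw [hadd]
    unfold solveCnt
    refine pvFilterLenLt _ _ _ v ?_ hv ?_ ?_
    · intro x hx
      simp only [PySem.Set.contains, Bool.not_eq_true'] at hx ⊢
      rw [List.contains_append] at hx
      exact (Bool.or_eq_false_iff.mp hx).1
    · simpa [PySem.Set.contains] using h
    · simp [PySem.Set.contains]
  · right
    refine ⟨?_, ?_⟩
    · rw [hadd]
      unfold solveCnt
      congr 1
      apply List.filter_congr
      intro k hk
      have hkv : k ≠ v := fun e => hv (e ▸ hk)
      simp [PySem.Set.contains, hkv]
    · unfold solveNbrs PySem.Dict.getD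
      rw [(PySem.Dict.get?_eq_none_iff_not_mem_keys (PySem.Dict.mk adj) v).mpr (by simpa using hv)]
      rfl

-- iterative DFS: pop v; if unvisited, add it and push its neighbors (first neighbor on top)
def solveLoop (adj : List (Int × List Int)) (visited : PySem.Set Int) (stack : List Int) :
    PySem.Set Int :=
  match stack with
  | [] => visited
  | v :: rest =>
    if h : PySem.Set.contains visited v then solveLoop adj visited rest
    else solveLoop adj (PySem.Set.add visited v) ((solveNbrs adj v) ++ rest)
termination_by (solveCnt adj visited, stack.length)
decreasing_by
  · exact Prod.Lex.right _ (by simp)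
  · rcases solveDec adj visited v (by simpa using h) with hlt | ⟨heq, hnil⟩
    · exact Prod.Lex.left _ _ hlt
    · rw [heq, hnil]; exact Prod.Lex.right _ (by simp)

def solve_alt (adj : List (Int × List Int)) (start : Int) : List Int :=
  solveLoop adj PySem.Set.empty [start]

-- ===== PRECONDITION & SPEC =====
def Spec_solve (adj : List (Int × List Int)) (start : Int) (out : List Int) : Prop := out = solve_alt adj start
instance (adj : List (Int × List Int)) (start : Int) (out : List Int) : Decidable (Spec_solve adj start out) := by unfold Spec_solve; infer_instance

-- ===== CLAIM (what is proved, stated in full; the proofs are below) =====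
def Claim_equal_solve : Prop := ∀ (adj : List (Int × List Int)) (start : Int), Dom_solve adj start → Spec_solve adj start (solve adj start)

-- ===== LEMMAS AND PROOFS =====

theorem pvFilterLenLe {α : Type} (p q : α → Bool) (l : List α)
    (himp : ∀ x, q x = true → p x = true) :
    (l.filter q).length ≤ (l.filter p).length := by
  simpa [List.countP_eq_length_filter] using
    List.countP_mono_left (l := l) (p := q) (q := p) (fun x _ => himp x)


-- monotonicity: the recursive dfs only appends to visited
theorem pvFoldExt {g : PySem.Set Int → Int → PySem.Set Int}
    (hg : ∀ w x, ∃ t, g w x = w ++ t) :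
    ∀ (vs : List Int) (w : PySem.Set Int), ∃ t, vs.foldl g w = w ++ t := by
  intro vs
  induction vs with
  | nil => intro w; exact ⟨[], by simp⟩
  | cons x vs ih =>
    intro w
    obtain ⟨t1, h1⟩ := hg w x
    obtain ⟨t2, h2⟩ := ih (g w x)
    exact ⟨t1 ++ t2, by rw [List.foldl_cons, h2, h1, List.append_assoc]⟩

theorem solveDfsMono (adj : List (Int × List Int)) :
    ∀ (f : Nat) (visited : PySem.Set Int) (v : Int),
      ∃ t, solveDfs adj f visited v = visited ++ t := by
  intro f
  induction f with
  | zero => intro visited v; exact ⟨[], by simp [solveDfs]⟩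
  | succ f ih =>
    intro visited v
    by_cases h : PySem.Set.contains visited v
    · exact ⟨[], by
        have hv : v ∈ visited := by simpa [PySem.Set.contains] using h
        simp [solveDfs, hv]⟩
    · have hadd : PySem.Set.add visited v = visited ++ [v] := by
        unfold PySem.Set.add; rw [if_neg h]
      obtain ⟨t, ht⟩ := pvFoldExt (fun w x => ih w x) (solveNbrs adj v) (PySem.Set.add visited v)
      have hv : v ∉ visited := by simpa [PySem.Set.contains] using h
      refine ⟨[v] ++ t, ?_⟩
      rw [show solveDfs adj (f + 1) visited v
            = (solveNbrs adj v).foldl (solveDfs adj f) (PySem.Set.add visited v) from by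
          simp [solveDfs, hv], ht, hadd, List.append_assoc]

theorem solveCntMono (adj : List (Int × List Int)) (visited t : PySem.Set Int) :
    solveCnt adj (visited ++ t) ≤ solveCnt adj visited := by
  unfold solveCnt
  refine pvFilterLenLe _ _ _ ?_
  intro x hx
  simp only [PySem.Set.contains, Bool.not_eq_true'] at hx ⊢
  rw [List.contains_append] at hx
  exact (Bool.or_eq_false_iff.mp hx).1

-- fuel irrelevance: once fuel exceeds the number of unvisited keys, its value does not matter
theorem solveDfsIrr (adj : List (Int × List Int)) :
    ∀ (n : Nat) (visited : PySem.Set Int) (v : Int) (f1 f2 : Nat),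
      solveCnt adj visited ≤ n → solveCnt adj visited < f1 → solveCnt adj visited < f2 →
      solveDfs adj f1 visited v = solveDfs adj f2 visited v := by
  intro n
  induction n using Nat.strong_induction_on with
  | _ n IH =>
    intro visited v f1 f2 hn h1 h2
    cases f1 with
    | zero => omega
    | succ g1 =>
      cases f2 with
      | zero => omega
      | succ g2 =>
        by_cases h : PySem.Set.contains visited v
        · have hv : v ∈ visited := by simpa [PySem.Set.contains] using h
          simp [solveDfs, hv]
        · have hv : v ∉ visited := by simpa [PySem.Set.contains] using h
          have hb : PySem.Set.contains visited v = false := by simpa using h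
          rcases solveDec adj visited v hb with hlt | ⟨heq, hnil⟩
          · simp only [solveDfs, hb, Bool.false_eq_true, if_false]
            have key : ∀ (vs : List Int) (w : PySem.Set Int),
                (∃ t, w = PySem.Set.add visited v ++ t) →
                vs.foldl (solveDfs adj g1) w = vs.foldl (solveDfs adj g2) w := by
              intro vs
              induction vs with
              | nil => intro w _; rfl
              | cons x vs ihv =>
                rintro w ⟨t, rfl⟩
                have hcw : solveCnt adj (PySem.Set.add visited v ++ t)
                    ≤ solveCnt adj (PySem.Set.add visited v) := solveCntMono adj _ t
                have hx := IH (solveCnt adj (PySem.Set.add visited v)) (by omega)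
                  (PySem.Set.add visited v ++ t) x g1 g2 hcw (by omega) (by omega)
                rw [List.foldl_cons, hx]
                obtain ⟨t2, ht2⟩ := solveDfsMono adj g2 (PySem.Set.add visited v ++ t) x
                exact ihv _ ⟨t ++ t2, by rw [ht2, List.append_assoc]⟩
            exact key _ _ ⟨[], by simp⟩
          · simp [solveDfs, hv, hnil]

theorem solveFoldIrr (adj : List (Int × List Int)) :
    ∀ (vs : List Int) (w : PySem.Set Int) (f1 f2 : Nat),
      solveCnt adj w < f1 → solveCnt adj w < f2 →
      vs.foldl (solveDfs adj f1) w = vs.foldl (solveDfs adj f2) w := by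
  intro vs
  induction vs with
  | nil => intros; rfl
  | cons x vs ih =>
    intro w f1 f2 h1 h2
    have hx := solveDfsIrr adj (solveCnt adj w) w x f1 f2 le_rfl h1 h2
    rw [List.foldl_cons, List.foldl_cons, hx]
    obtain ⟨t, ht⟩ := solveDfsMono adj f2 w x
    have hle : solveCnt adj (solveDfs adj f2 w x) ≤ solveCnt adj w := by
      rw [ht]; exact solveCntMono adj w t
    exact ih _ f1 f2 (lt_of_le_of_lt hle h1) (lt_of_le_of_lt hle h2)

-- simulation: folding the recursive dfs over the stack is the iterative loop
theorem solveSim (adj : List (Int × List Int)) :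
    ∀ (n : Nat) (st : List Int) (visited : PySem.Set Int) (f : Nat),
      solveCnt adj visited ≤ n → solveCnt adj visited < f →
      st.foldl (solveDfs adj f) visited = solveLoop adj visited st := by
  intro n
  induction n using Nat.strong_induction_on with
  | _ n IH =>
    intro st visited f hn hf
    induction st generalizing visited f with
    | nil => rw [solveLoop, List.foldl_nil]
    | cons v rest ihst =>
      obtain ⟨g, rfl⟩ : ∃ g, f = g + 1 := ⟨f - 1, by omega⟩
      by_cases h : PySem.Set.contains visited v
      · have hv : v ∈ visited := by simpa [PySem.Set.contains] using h
        rw [List.foldl_cons,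
            show solveDfs adj (g + 1) visited v = visited from by simp [solveDfs, hv],
            ihst visited (g + 1) hn hf]
        conv_rhs => rw [solveLoop]
        rw [dif_pos h]
      · have hv : v ∉ visited := by simpa [PySem.Set.contains] using h
        have hstep : solveDfs adj (g + 1) visited v
            = (solveNbrs adj v).foldl (solveDfs adj g) (PySem.Set.add visited v) := by
          simp [solveDfs, hv]
        rcases solveDec adj visited v (by simpa using h) with hlt | ⟨heq, hnil⟩
        · rw [List.foldl_cons, hstep,
              solveFoldIrr adj (solveNbrs adj v) _ g (g + 1) (by omega) (by omega),
              ← List.foldl_append,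
              IH (solveCnt adj (PySem.Set.add visited v)) (by omega)
                (solveNbrs adj v ++ rest) (PySem.Set.add visited v) (g + 1) le_rfl (by omega)]
          conv_rhs => rw [solveLoop]
          rw [dif_neg h]
        · rw [List.foldl_cons, hstep, hnil, List.foldl_nil,
              ihst (PySem.Set.add visited v) (g + 1) (by omega) (by omega)]
          conv_rhs => rw [solveLoop]
          rw [dif_neg h, hnil, List.nil_append]

-- ===== VERDICT (by name: the statement is the Claim_ definition above) =====
theorem solve_spec : Claim_equal_solve := by
  intro adj start _
  unfold Spec_solve solve solve_alt
  have hcnt : solveCnt adj PySem.Set.empty < adj.length + 1 := by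
    have : solveCnt adj PySem.Set.empty ≤ (adj.map Prod.fst).length :=
      List.length_filter_le _ _
    simpa using Nat.lt_succ_of_le (by simpa using this)
  have := solveSim adj (solveCnt adj PySem.Set.empty) [start] PySem.Set.empty (adj.length + 1)
    le_rfl hcnt
  simpa using this
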